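-- pv_equiv track=rewrite | github.com/Abhi08ch/Algorithm-Visualizer-Animator | src/src_algorithms.py | bubble_sort_steps
-- ===== SOURCE A (Python) =====
-- from typing import List, Tuple, Dict, Set, Optional
-- from typing import List
--
-- def bubble_sort_steps(arr: List[int]):
--     n = len(arr)
--     arr = arr.copy()
--     yield arr.copy()
--     for i in range(n):
--         for j in range(0, n-i-1):
--             if arr[j] > arr[j+1]:
--                 arr[j], arr[j+1] = arr[j+1], arr[j]
--                 yield arr.copy()
-- ===== SOURCE B (Python) =====
-- def _sweep(a):
--     # One functional pass: rebuild a fresh array left-to-right carrying the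
--     # running maximum; record prefix + [carry] + untouched suffix at each swap.
--     if not a:
--         return [], []
--     out, snaps = [], []
--     carry = a[0]
--     for j in range(1, len(a)):
--         y = a[j]
--         if carry > y:
--             out.append(y)
--             snaps.append(out + [carry] + a[j + 1:])
--         else:
--             out.append(carry)
--             carry = y
--     out.append(carry)
--     return out, snaps
--
--
-- def bubble_sort_steps(arr):
--     a = list(arr)
--     yield list(a)
--     for _ in range(len(a)):
--         a, snaps = _sweep(a)
--         yield from snaps
-- ===== Notes on version B (the rewrite author's own statement) =====
-- stated objective: alternative
-- what changed: A mutates one array in place with nested shrinking index loops, swapping neighbours and copying the whole array after each swap; B is a functional staged decomposition: a helper pass rebuilds a fresh array left-to-right with a carried running maximum (no in-place swaps), constructing each snapshot as built-prefix + [carry] + untouched suffix, and the driver just concatenates the snapshot lists of n such full-width passes.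
import Mathlib
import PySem

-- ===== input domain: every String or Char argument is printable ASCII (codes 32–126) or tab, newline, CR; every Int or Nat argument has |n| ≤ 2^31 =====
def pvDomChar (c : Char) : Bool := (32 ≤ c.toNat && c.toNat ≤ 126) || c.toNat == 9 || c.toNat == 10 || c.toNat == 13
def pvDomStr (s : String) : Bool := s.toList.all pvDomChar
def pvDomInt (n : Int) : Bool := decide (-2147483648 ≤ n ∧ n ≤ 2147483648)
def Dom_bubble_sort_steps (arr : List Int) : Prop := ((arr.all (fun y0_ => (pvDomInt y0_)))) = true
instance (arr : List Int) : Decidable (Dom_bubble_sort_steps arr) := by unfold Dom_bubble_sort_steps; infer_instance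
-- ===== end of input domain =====

-- B replaces A's in-place nested index-swap loops by a functional carry pass that
-- rebuilds a fresh array and assembles each snapshot as prefix+[carry]+suffix;
-- identical snapshot sequence, same cost (objective: alternative).

-- ===== PORT A =====
-- one inner-loop step of A: compare arr[j] with arr[j+1], swap and record a snapshot.
-- indices j, j+1 are always in range in A (j < n-i-1 ≤ n-1), so getD is exact here.
def pvStepA (st : List Int × List (List Int)) (j : Nat) : List Int × List (List Int) :=
  let a := st.1
  if a.getD j 0 > a.getD (j + 1) 0 then
    let a' := (a.set j (a.getD (j + 1) 0)).set (j + 1) (a.getD j 0)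
    (a', st.2 ++ [a'])
  else st

def bubble_sort_steps (arr : List Int) : List (List Int) :=
  let n := arr.length
  ((List.range n).foldl
    (fun st i => (List.range (n - i - 1)).foldl pvStepA st)
    (arr, [arr])).2

-- ===== PORT B =====
-- one step of B's _sweep pass: consume a[j] (j is always in range here, so getD is
-- exact), extend the rebuilt prefix, keep or replace the carry, and on a swap record
-- prefix + [carry] + a[j+1:] (the slice has a nonnegative start, so drop is exact).
def pvSweepStep (a : List Int) (st : List Int × List (List Int) × Int) (j : Nat) :
    List Int × List (List Int) × Int :=
  let y := a.getD j 0
  if st.2.2 > y then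
    (st.1 ++ [y], st.2.1 ++ [st.1 ++ [y] ++ [st.2.2] ++ a.drop (j + 1)], st.2.2)
  else
    (st.1 ++ [st.2.2], st.2.1, y)

-- B's _sweep: one functional pass over a, j running over range(1, len(a))
def pvSweep (a : List Int) : List Int × List (List Int) :=
  match a with
  | [] => ([], [])
  | a0 :: _ =>
    let st := (List.range' 1 (a.length - 1)).foldl (pvSweepStep a) ([], [], a0)
    (st.1 ++ [st.2.2], st.2.1)

-- B's driver: n staged passes, concatenating the snapshot lists
def bubble_sort_steps_alt (arr : List Int) : List (List Int) :=
  ((List.range arr.length).foldl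
    (fun st _ =>
      let r := pvSweep st.1
      (r.1, st.2 ++ r.2))
    (arr, [arr])).2

-- ===== PRECONDITION & SPEC =====
def Spec_bubble_sort_steps (arr : List Int) (out : List (List Int)) : Prop := out = bubble_sort_steps_alt arr
instance (arr : List Int) (out : List (List Int)) : Decidable (Spec_bubble_sort_steps arr out) := by unfold Spec_bubble_sort_steps; infer_instance

-- ===== CLAIM (what is proved, stated in full; the proofs are below) =====
def Claim_equal_bubble_sort_steps : Prop := ∀ (arr : List Int), Dom_bubble_sort_steps arr → Spec_bubble_sort_steps arr (bubble_sort_steps arr)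

-- ===== LEMMAS AND PROOFS =====

-- structural model of one left-to-right sweep over the first m+1 elements:
-- final array and the list of snapshots taken after each swap.
def sweepN : Nat → List Int → List Int × List (List Int)
  | 0, a => (a, [])
  | _ + 1, [] => ([], [])
  | _ + 1, [x] => ([x], [])
  | m + 1, x :: y :: t =>
    if x > y then
      let r := sweepN m (x :: t)
      (y :: r.1, (y :: x :: t) :: r.2.map (y :: ·))
    else
      let r := sweepN m (y :: t)
      (x :: r.1, r.2.map (x :: ·))

-- the accumulator of the A-fold is a pure prefix
theorem foldA_acc (js : List Nat) : ∀ (a : List Int) (acc : List (List Int)),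
    js.foldl pvStepA (a, acc)
      = ((js.foldl pvStepA (a, [])).1, acc ++ (js.foldl pvStepA (a, [])).2) := by
  induction js with
  | nil => intro a acc; simp
  | cons j rest ih =>
    intro a acc
    simp only [List.foldl_cons, pvStepA]
    by_cases h : a.getD j 0 > a.getD (j + 1) 0
    · simp only [if_pos h]
      rw [ih _ (acc ++ [_]), ih _ ([] ++ [_])]
      simp
    · simp only [if_neg h]
      exact ih a acc

-- shifting every index by one peels the head of the array
theorem shiftA (js : List Nat) : ∀ (t : List Int) (h : Int) (acc : List (List Int)),
    js.foldl (fun st j => pvStepA st (j + 1)) (h :: t, acc)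
      = (h :: (js.foldl pvStepA (t, [])).1,
         acc ++ (js.foldl pvStepA (t, [])).2.map (h :: ·)) := by
  induction js with
  | nil => intro t h acc; simp
  | cons j rest ih =>
    intro t h acc
    by_cases hcmp : t[j]?.getD 0 > t[j + 1]?.getD 0
    · set t' := (t.set j (t.getD (j + 1) 0)).set (j + 1) (t.getD j 0) with ht'
      have h1 : pvStepA (h :: t, acc) (j + 1) = (h :: t', acc ++ [h :: t']) := by
        simp [pvStepA, hcmp, ht']
      have h2 : pvStepA (t, []) j = (t', [t']) := by
        simp [pvStepA, hcmp, ht']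
      rw [List.foldl_cons, List.foldl_cons, h1, h2, ih, foldA_acc rest t' [t']]
      simp
    · have h1 : pvStepA (h :: t, acc) (j + 1) = (h :: t, acc) := by
        simp [pvStepA, hcmp]
      have h2 : pvStepA (t, []) j = (t, []) := by
        simp [pvStepA, hcmp]
      rw [List.foldl_cons, List.foldl_cons, h1, h2, ih]

-- the inner index fold of length m computes the structural sweep
theorem bridgeA : ∀ (m : Nat) (a : List Int) (acc : List (List Int)), m < a.length →
    (List.range m).foldl pvStepA (a, acc) = ((sweepN m a).1, acc ++ (sweepN m a).2) := by
  intro m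
  induction m with
  | zero => intro a acc _; simp [sweepN]
  | succ m ih =>
    intro a acc hm
    match a with
    | [] => simp at hm
    | [x] => simp at hm
    | x :: y :: t =>
      rw [List.range_succ_eq_map, List.foldl_cons, List.foldl_map]
      simp only [Nat.succ_eq_add_one]
      by_cases h : x > y
      · have h1 : pvStepA (x :: y :: t, acc) 0 = (y :: x :: t, acc ++ [y :: x :: t]) := by
          simp [pvStepA, h]
        rw [h1, shiftA, ih _ [] (by simp at hm ⊢; omega)]
        simp [sweepN, h]
      · have h1 : pvStepA (x :: y :: t, acc) 0 = (x :: y :: t, acc) := by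
          simp [pvStepA, h]
        rw [h1, shiftA, ih _ [] (by simp at hm ⊢; omega)]
        simp [sweepN, h]

-- the sweep permutes the array
theorem sweep_perm : ∀ (m : Nat) (a : List Int), ((sweepN m a).1).Perm a := by
  intro m a
  induction m, a using sweepN.induct with
  | case1 a => simp [sweepN]
  | case2 m => simp [sweepN]
  | case3 m x => simp [sweepN]
  | case4 m x y t hgt ih =>
    have he : (sweepN (m + 1) (x :: y :: t)).1 = y :: (sweepN m (x :: t)).1 := by
      simp [sweepN, hgt]
    rw [he]
    exact (ih.cons y).trans (List.Perm.swap x y t)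
  | case5 m x y t hgt ih =>
    have he : (sweepN (m + 1) (x :: y :: t)).1 = x :: (sweepN m (y :: t)).1 := by
      simp [sweepN, hgt]
    rw [he]
    exact ih.cons x

theorem sweep_len (m : Nat) (a : List Int) : ((sweepN m a).1).length = a.length :=
  (sweep_perm m a).length_eq

-- sweeping a sorted array does nothing and records nothing
theorem sweep_sorted : ∀ (m : Nat) (a : List Int), a.Pairwise (· ≤ ·) → sweepN m a = (a, []) := by
  intro m a
  induction m, a using sweepN.induct with
  | case1 a => intro _; simp [sweepN]
  | case2 m => intro _; simp [sweepN]
  | case3 m x => intro _; simp [sweepN]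
  | case4 m x y t hgt ih =>
    intro hs
    exfalso
    have := (List.pairwise_cons.mp hs).1 y (by simp)
    omega
  | case5 m x y t hgt ih =>
    intro hs
    have hs' : (y :: t).Pairwise (· ≤ ·) := (List.pairwise_cons.mp hs).2
    simp [sweepN, hgt, ih hs']

-- a sweep bounded inside the prefix leaves the suffix untouched
theorem sweep_append : ∀ (m : Nat) (p q : List Int), m < p.length →
    sweepN m (p ++ q) = ((sweepN m p).1 ++ q, (sweepN m p).2.map (· ++ q)) := by
  intro m
  induction m with
  | zero => intro p q _; simp [sweepN]
  | succ m ih =>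
    intro p q hm
    match p with
    | [] => simp at hm
    | [x] => simp at hm
    | x :: y :: t =>
      by_cases h : x > y
      · have he : sweepN (m + 1) (x :: y :: (t ++ q))
            = (y :: (sweepN m (x :: (t ++ q))).1,
               (y :: x :: (t ++ q)) :: (sweepN m (x :: (t ++ q))).2.map (y :: ·)) := by
          simp [sweepN, h]
        have he' : sweepN (m + 1) (x :: y :: t)
            = (y :: (sweepN m (x :: t)).1,
               (y :: x :: t) :: (sweepN m (x :: t)).2.map (y :: ·)) := by
          simp [sweepN, h]
        have hih := ih (x :: t) q (by simp at hm ⊢; omega)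
        simp only [List.cons_append] at hih ⊢
        rw [he, he', hih]
        simp [List.map_map, Function.comp_def]
      · have he : sweepN (m + 1) (x :: y :: (t ++ q))
            = (x :: (sweepN m (y :: (t ++ q))).1,
               (sweepN m (y :: (t ++ q))).2.map (x :: ·)) := by
          simp [sweepN, h]
        have he' : sweepN (m + 1) (x :: y :: t)
            = (x :: (sweepN m (y :: t)).1, (sweepN m (y :: t)).2.map (x :: ·)) := by
          simp [sweepN, h]
        have hih := ih (y :: t) q (by simp at hm ⊢; omega)
        simp only [List.cons_append] at hih ⊢
        rw [he, he', hih]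
        simp [List.map_map, Function.comp_def]

-- a full sweep drives a maximum into the last position
theorem sweep_last_max : ∀ (m : Nat) (p : List Int), p ≠ [] → m + 1 = p.length →
    ∃ l mx, (sweepN m p).1 = l ++ [mx] ∧ ∀ x ∈ p, x ≤ mx := by
  intro m p
  induction m, p using sweepN.induct with
  | case1 a =>
    intro hne hlen
    match a, hlen with
    | [x], _ => exact ⟨[], x, by simp [sweepN], by simp⟩
  | case2 m => intro hne _; exact absurd rfl hne
  | case3 m x => intro _ hlen; simp at hlen
  | case4 m x y t hgt ih =>
    intro _ hlen
    obtain ⟨l, mx, h1, h2⟩ := ih (by simp) (by simp at hlen ⊢; omega)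
    refine ⟨y :: l, mx, by simp [sweepN, hgt, h1], ?_⟩
    intro z hz
    rcases List.mem_cons.mp hz with rfl | hz
    · exact h2 _ (by simp)
    · rcases List.mem_cons.mp hz with rfl | hz
      · exact le_trans (by omega) (h2 x (by simp))
      · exact h2 _ (by simp [hz])
  | case5 m x y t hgt ih =>
    intro _ hlen
    obtain ⟨l, mx, h1, h2⟩ := ih (by simp) (by simp at hlen ⊢; omega)
    refine ⟨x :: l, mx, by simp [sweepN, hgt, h1], ?_⟩
    intro z hz
    rcases List.mem_cons.mp hz with rfl | hz
    · exact le_trans (by omega) (h2 y (by simp))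
    · exact h2 _ (by simp [hz])

-- widening the sweep past a sorted, dominating suffix changes nothing
theorem sweep_stop : ∀ (t : List Int) (x : Int) (q : List Int) (k : Nat),
    (∀ z ∈ x :: t, ∀ y ∈ q, z ≤ y) → q.Pairwise (· ≤ ·) →
    sweepN (t.length + k) ((x :: t) ++ q) = sweepN t.length ((x :: t) ++ q) := by
  intro t
  induction t with
  | nil =>
    intro x q k hle hq
    have hs : (x :: q).Pairwise (· ≤ ·) :=
      List.pairwise_cons.mpr ⟨fun y hy => hle x (by simp) y hy, hq⟩
    simp [sweep_sorted _ _ hs]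
  | cons y t' ih =>
    intro x q k hle hq
    have hx : ∀ z ∈ x :: t', ∀ y' ∈ q, z ≤ y' := by
      intro z hz
      rcases List.mem_cons.mp hz with rfl | hz'
      · exact hle z (by simp)
      · exact hle z (by simp [hz'])
    have hy : ∀ z ∈ y :: t', ∀ y' ∈ q, z ≤ y' := by
      intro z hz
      rcases List.mem_cons.mp hz with rfl | hz'
      · exact hle z (by simp)
      · exact hle z (by simp [hz'])
    simp only [List.length_cons]
    rw [show t'.length + 1 + k = t'.length + k + 1 from by omega]
    by_cases h : x > y
    · have heq := ih x q k hx hq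
      have he : ∀ mm, sweepN (mm + 1) (x :: y :: (t' ++ q))
          = (y :: (sweepN mm (x :: (t' ++ q))).1,
             (y :: x :: (t' ++ q)) :: (sweepN mm (x :: (t' ++ q))).2.map (y :: ·)) := by
        intro mm; simp [sweepN, h]
      simp only [List.cons_append] at heq ⊢
      rw [he, he, heq]
    · have heq := ih y q k hy hq
      have he : ∀ mm, sweepN (mm + 1) (x :: y :: (t' ++ q))
          = (x :: (sweepN mm (y :: (t' ++ q))).1,
             (sweepN mm (y :: (t' ++ q))).2.map (x :: ·)) := by
        intro mm; simp [sweepN, h]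
      simp only [List.cons_append] at heq ⊢
      rw [he, he, heq]

-- B's carry fold over the indices j, j+1, … computes the structural sweep of
-- carry :: (a.drop j), with the rebuilt prefix `out` factored out in front
theorem carry_eq : ∀ (rest a : List Int) (j : Nat), a.drop j = rest →
    ∀ (out : List Int) (snaps : List (List Int)) (carry : Int),
    (let st := (List.range' j rest.length).foldl (pvSweepStep a) (out, snaps, carry)
     (st.1 ++ [st.2.2], st.2.1))
      = (out ++ (sweepN rest.length (carry :: rest)).1,
         snaps ++ (sweepN rest.length (carry :: rest)).2.map (out ++ ·)) := by
  intro rest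
  induction rest with
  | nil => intro a j _ out snaps carry; simp [sweepN]
  | cons y t ih =>
    intro a j hdrop out snaps carry
    have hj : a[j]? = some y := by
      rw [← List.head?_drop, hdrop]; rfl
    have hdrop' : a.drop (j + 1) = t := by
      have : a.drop (j + 1) = (a.drop j).drop 1 := by
        rw [List.drop_drop]
      rw [this, hdrop]; rfl
    have hrange : List.range' j (y :: t).length = j :: List.range' (j + 1) t.length := by
      simp [List.range'_succ]
    by_cases h : carry > y
    · have hstep : pvSweepStep a (out, snaps, carry) j
          = (out ++ [y], snaps ++ [out ++ [y] ++ [carry] ++ t], carry) := by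
        simp [pvSweepStep, List.getD, hj, h, hdrop']
      rw [hrange, List.foldl_cons, hstep,
        ih a (j + 1) hdrop' (out ++ [y]) (snaps ++ [out ++ [y] ++ [carry] ++ t]) carry]
      have he : sweepN (t.length + 1) (carry :: y :: t)
          = (y :: (sweepN t.length (carry :: t)).1,
             (y :: carry :: t) :: (sweepN t.length (carry :: t)).2.map (y :: ·)) := by
        simp [sweepN, h]
      simp [he, List.map_map, Function.comp_def]
    · have hstep : pvSweepStep a (out, snaps, carry) j
          = (out ++ [carry], snaps, y) := by
        simp [pvSweepStep, List.getD, hj, h]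
      rw [hrange, List.foldl_cons, hstep,
        ih a (j + 1) hdrop' (out ++ [carry]) snaps y]
      have he : sweepN (t.length + 1) (carry :: y :: t)
          = (carry :: (sweepN t.length (y :: t)).1,
             (sweepN t.length (y :: t)).2.map (carry :: ·)) := by
        simp [sweepN, Int.not_lt.mp h]
      simp [he, List.map_map, Function.comp_def]

-- B's _sweep is the full-width structural sweep
theorem pvSweep_eq (a : List Int) : pvSweep a = sweepN (a.length - 1) a := by
  match a with
  | [] => simp [pvSweep, sweepN]
  | a0 :: rest =>
    have := carry_eq rest (a0 :: rest) 1 (by simp) [] [] a0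
    simp only [pvSweep, List.length_cons, Nat.add_sub_cancel]
    simp only at this
    rw [this]
    simp

-- the settledness invariant: the last i elements are sorted and dominate the rest
def Settled (a : List Int) (i : Nat) : Prop :=
  ∃ p q, a = p ++ q ∧ q.length = i ∧ q.Pairwise (· ≤ ·) ∧ ∀ x ∈ p, ∀ y ∈ q, x ≤ y

-- main induction: with i passes done and cnt = n - i remaining, A's shrinking-bound
-- in-place passes and B's full-width functional passes yield the same snapshot list
theorem main_loop (n : Nat) : ∀ (cnt i : Nat) (a : List Int) (acc : List (List Int)),
    i + cnt = n → a.length = n → Settled a i →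
    ((List.range' i cnt).foldl
        (fun st i => (List.range (n - i - 1)).foldl pvStepA st) (a, acc)).2
      = ((List.range' i cnt).foldl
          (fun st _ =>
            let r := pvSweep st.1
            (r.1, st.2 ++ r.2)) (a, acc)).2 := by
  intro cnt
  induction cnt with
  | zero => intro i a acc _ _ _; rfl
  | succ cnt ih =>
    intro i a acc hin hlen hset
    obtain ⟨p, q, hpq, hqlen, hqsort, hdom⟩ := hset
    have hplen : p.length = n - i := by
      have := congrArg List.length hpq; simp at this; omega
    have hpne : p ≠ [] := by
      intro h; rw [h] at hplen; simp at hplen; omega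
    obtain ⟨x, t, hxt⟩ := List.exists_cons_of_ne_nil hpne
    subst hxt
    have ht : t.length = n - i - 1 := by simp at hplen; omega
    have hwide : sweepN (n - 1) a = sweepN (n - i - 1) a := by
      have hk := sweep_stop t x q i hdom hqsort
      rw [hpq, show n - 1 = t.length + i from by omega, hk, ht]
    have hsw : pvSweep a = sweepN (n - i - 1) a := by
      rw [pvSweep_eq, hlen, hwide]
    simp only [List.range'_succ, List.foldl_cons]
    rw [bridgeA _ a acc (by omega), hsw]
    set s := (sweepN (n - i - 1) a).2 with hs
    set a' := (sweepN (n - i - 1) a).1 with ha'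
    have hlen' : a'.length = n := by rw [ha', sweep_len]; exact hlen
    have hset' : Settled a' (i + 1) := by
      have happ := sweep_append (n - i - 1) (x :: t) q (by simp; omega)
      obtain ⟨l, mx, hlmx, hmax⟩ := sweep_last_max (n - i - 1) (x :: t) (by simp)
        (by simp; omega)
      have hmem : ∀ z ∈ l ++ [mx], z ∈ x :: t := by
        intro z hz
        exact (sweep_perm (n - i - 1) (x :: t)).subset (hlmx ▸ hz)
      refine ⟨l, mx :: q, ?_, by simp [hqlen], ?_, ?_⟩
      · rw [ha', hpq, happ, hlmx]; simp
      · refine List.pairwise_cons.mpr ⟨?_, hqsort⟩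
        intro y hy
        exact hdom mx (hmem mx (by simp)) y hy
      · intro z hz y hy
        rcases List.mem_cons.mp hy with rfl | hy
        · exact hmax z (hmem z (by simp [hz]))
        · exact hdom z (hmem z (by simp [hz])) y hy
    exact ih (i + 1) a' (acc ++ s) (by omega) hlen' hset'

-- ===== VERDICT (by name: the statement is the Claim_ definition above) =====
theorem bubble_sort_steps_spec : Claim_equal_bubble_sort_steps := by
  intro arr _
  unfold Spec_bubble_sort_steps bubble_sort_steps bubble_sort_steps_alt
  simp only
  rw [List.range_eq_range']
  exact main_loop arr.length arr.length 0 arr [arr] (by omega) rfl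
    ⟨arr, [], by simp, rfl, by simp, by simp⟩
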